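-- pv_equiv track=rewrite | github.com/ramankarki/learning-python | computer_scientist/counter.py | sum_even_except_first
-- ===== SOURCE A (Python) =====
-- def sum_even_except_first(numbers):
--     '''
--     Sum all the even numbers except first number.
--     '''
--     count = 0
--     sum = 0
--     for i in numbers:
--         if i % 2 == 0:
--             count += 1
--             if count != 1:
--                 sum += i
--     return sum
-- ===== SOURCE B (Python) =====
-- def sum_even_except_first(numbers):
--     '''
--     Sum all the even numbers except first number.
--     '''
--     evens = [i for i in numbers if i % 2 == 0]
--     return sum(evens) - evens[0] if evens else 0
-- ===== Notes on version B (the rewrite author's own statement) =====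
-- stated objective: simpler
-- what changed: Replaces the stateful counter-flag loop by a collect-then-combine form: filter the evens once and return their sum minus the first even (0 if none).
import Mathlib
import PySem

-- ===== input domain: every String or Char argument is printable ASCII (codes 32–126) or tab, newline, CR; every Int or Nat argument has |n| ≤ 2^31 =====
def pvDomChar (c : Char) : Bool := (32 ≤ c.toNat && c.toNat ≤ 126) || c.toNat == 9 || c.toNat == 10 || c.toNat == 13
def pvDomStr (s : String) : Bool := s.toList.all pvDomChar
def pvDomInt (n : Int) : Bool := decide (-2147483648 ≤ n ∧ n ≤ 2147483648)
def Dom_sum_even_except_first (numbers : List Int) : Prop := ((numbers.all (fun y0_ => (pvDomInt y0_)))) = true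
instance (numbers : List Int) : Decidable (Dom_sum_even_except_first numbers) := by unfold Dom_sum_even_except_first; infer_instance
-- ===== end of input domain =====

-- B replaces A's stateful counter-flag loop by filter-the-evens, then sum minus first even (simpler decomposition).

-- ===== PORT A =====
-- A's loop over `numbers` carrying the state (count, sum); branches in source order.
def sumEvenLoopA : List Int → Int → Int → Int
  | [], _, s => s
  | i :: rest, c, s =>
    if PySem.Int.mod i 2 = 0 then
      if c + 1 ≠ 1 then sumEvenLoopA rest (c + 1) (s + i)
      else sumEvenLoopA rest (c + 1) s
    else sumEvenLoopA rest c s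

def sum_even_except_first (numbers : List Int) : Int :=
  sumEvenLoopA numbers 0 0

-- ===== PORT B =====
def sum_even_except_first_alt (numbers : List Int) : Int :=
  let evens := numbers.filter (fun i => PySem.Int.mod i 2 = 0)
  match evens with
  | [] => 0
  | e :: _ => evens.sum - e

-- ===== PRECONDITION & SPEC =====
def Spec_sum_even_except_first (numbers : List Int) (out : Int) : Prop := out = sum_even_except_first_alt numbers
instance (numbers : List Int) (out : Int) : Decidable (Spec_sum_even_except_first numbers out) := by unfold Spec_sum_even_except_first; infer_instance

-- ===== CLAIM (what is proved, stated in full; the proofs are below) =====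
def Claim_equal_sum_even_except_first : Prop := ∀ (numbers : List Int), Dom_sum_even_except_first numbers → Spec_sum_even_except_first numbers (sum_even_except_first numbers)

-- ===== LEMMAS AND PROOFS =====

-- Once count ≥ 1 (c ≠ 0), A's loop adds every remaining even number.
theorem sumEvenLoopA_pos (numbers : List Int) :
    ∀ (c s : Int), c ≠ 0 → 0 ≤ c →
      sumEvenLoopA numbers c s = s + (numbers.filter (fun i => PySem.Int.mod i 2 = 0)).sum := by
  induction numbers with
  | nil => intro c s _ _; simp [sumEvenLoopA]
  | cons i rest ih =>
    intro c s hc hc0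
    by_cases h : PySem.Int.mod i 2 = 0
    · have h1 : c + 1 ≠ 1 := by omega
      simp only [sumEvenLoopA, if_pos h, if_pos h1, List.filter_cons, decide_eq_true h, if_true]
      rw [ih (c + 1) (s + i) (by omega) (by omega)]
      simp; ring
    · simp only [sumEvenLoopA, if_neg h, List.filter_cons, decide_eq_false h, Bool.false_eq_true, if_false]
      exact ih c s hc hc0

-- Starting from count = 0, A's loop skips the first even and sums the rest of the evens.
theorem sumEvenLoopA_zero (numbers : List Int) :
    ∀ (s : Int),
      sumEvenLoopA numbers 0 s =
        match numbers.filter (fun i => PySem.Int.mod i 2 = 0) with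
        | [] => s
        | _ :: rest => s + rest.sum := by
  induction numbers with
  | nil => intro s; simp [sumEvenLoopA]
  | cons i rest ih =>
    intro s
    by_cases h : PySem.Int.mod i 2 = 0
    · have h1 : ¬ ((0 : Int) + 1 ≠ 1) := by omega
      simp only [sumEvenLoopA, if_pos h, if_neg h1, List.filter_cons, decide_eq_true h, if_true]
      exact sumEvenLoopA_pos rest 1 s (by omega) (by omega)
    · simp only [sumEvenLoopA, if_neg h, List.filter_cons, decide_eq_false h, Bool.false_eq_true, if_false]
      exact ih s

-- ===== VERDICT (by name: the statement is the Claim_ definition above) =====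
theorem sum_even_except_first_spec : Claim_equal_sum_even_except_first := by
  intro numbers _
  unfold Spec_sum_even_except_first sum_even_except_first sum_even_except_first_alt
  rw [sumEvenLoopA_zero numbers 0]
  cases h : numbers.filter (fun i => PySem.Int.mod i 2 = 0) with
  | nil => simp
  | cons e rest => simp [List.sum_cons]
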